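-- pv_equiv track=rewrite | github.com/sinansnsrc/Google-FooBar | FooBar5.py | generateSolution
-- ===== SOURCE A (Python) =====
-- lock = {((0, 0), (0, 0)): 0, ((0, 0), (0, 1)): 1, ((0, 0), (1, 0)): 1, ((0, 0), (1, 1)): 0, ((0, 1), (0, 0)): 1,
--         ((0, 1), (0, 1)): 0, ((0, 1), (1, 0)): 0, ((0, 1), (1, 1)): 0, ((1, 0), (0, 0)): 1, ((1, 0), (0, 1)): 0,
--         ((1, 0), (1, 0)): 0, ((1, 0), (1, 1)): 0, ((1, 1), (0, 0)): 0, ((1, 1), (0, 1)): 0, ((1, 1), (1, 0)): 0,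
--         ((1, 1), (1, 1)): 0}
--
-- key = {0: (((0, 0), (0, 0)), ((0, 0), (1, 1)), ((0, 1), (0, 1)), ((0, 1), (1, 0)), ((0, 1), (1, 1)), ((1, 0), (0, 1)),
--            ((1, 0), (1, 0)), ((1, 0), (1, 1)), ((1, 1), (0, 0)), ((1, 1), (0, 1)), ((1, 1), (1, 0)), ((1, 1), (1, 1))),
--        1: (((0, 0), (0, 1)), ((0, 0), (1, 0)), ((0, 1), (0, 0)), ((1, 0), (0, 0)))}
--
-- pairCombinations = ((1, 1), (1, 0), (0, 1), (0, 0))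
--
-- def generateColumn(column):
--     generatedColumns = []
--     currentColumn = key[column[0]]
--
--     for currentRow in range(1, len(column)):
--         currentIndex = column[currentRow]
--         potentialColumns = []
--
--         for permutation in currentColumn:
--             for combination in pairCombinations:
--                 if lock[(permutation[currentRow], combination)] == currentIndex: potentialColumns.append(permutation + (combination,)) #adds valid column (extension) to list
--
--         currentColumn = potentialColumns
--
--     matchColumns = [tuple(zip(*i)) for i in currentColumn] #matches two columns together to form column pairs
--
--     for pair in matchColumns: #converts each column to binary representation for efficiency
--         leftColumn = int(''.join(str(e) for e in pair[0]), 2)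
--         rightColumn = int(''.join(str(e) for e in pair[1]), 2)
--         generatedColumns.append((leftColumn, rightColumn))
--
--     return generatedColumns
--
-- def generateSolution(g):
--     paths = {}
--
--     for pairs in generateColumn(g[0]):
--         paths[pairs[0]] = 1 #initialize as possible path
--     for columns in g:
--         evolution = {}
--         pairs = generateColumn(columns)
--         for pair in pairs:
--             left, right = pair
--             if left not in paths: paths[left] = 0 #impossible path
--             if right not in evolution: evolution[right] = 0 #new possibility
--             evolution[right] += paths[left] #grow path
--         paths = evolution
--
--     count = 0
--
--     for value in paths:
--         count += paths[value]
--
--     return count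
-- ===== SOURCE B (Python) =====
-- # Same preimage count, but valid (left,right) preimage column pairs are built by a
-- # bit-accumulating depth-first search with the arithmetic rule "cell = 1 iff exactly
-- # one of the four 2x2 bits is 1", instead of A's table-driven tuple extension + zip +
-- # binary-string parsing; the transfer DP uses dict.get instead of default-key inserts.
-- def _seedRows():
--     # seed rows 0..1 of the preimage, grouped by the grid cell value they produce
--     starts = {}
--     for l0 in (0, 1):
--         for r0 in (0, 1):
--             for l1 in (0, 1):
--                 for r1 in (0, 1):
--                     starts.setdefault(int(l0 + r0 + l1 + r1 == 1), []).append(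
--                         (l1, r1, l0 * 2 + l1, r0 * 2 + r1))
--     return starts
--
-- def _columnPairs(column):
--     out = []
--     n = len(column)
--
--     def go(i, pl, pr, l, r):
--         if i == n:
--             out.append((l, r))
--             return
--         for a, b in ((1, 1), (1, 0), (0, 1), (0, 0)):
--             if int(pl + pr + a + b == 1) == column[i]:
--                 go(i + 1, a, b, l * 2 + a, r * 2 + b)
--
--     for pl, pr, l, r in _seedRows()[column[0]]:
--         go(1, pl, pr, l, r)
--     return out
--
-- def generateSolution(g):
--     paths = {}
--     for left, _ in _columnPairs(g[0]):
--         paths[left] = 1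
--     for column in g:
--         evolution = {}
--         for left, right in _columnPairs(column):
--             evolution[right] = evolution.get(right, 0) + paths.get(left, 0)
--         paths = evolution
--     return sum(paths.values())
-- ===== Notes on version B (the rewrite author's own statement) =====
-- stated objective: alternative
-- what changed: Valid (left,right) preimage column pairs are produced by a bit-accumulating depth-first search using the arithmetic rule 'cell = 1 iff exactly one of the four 2x2 bits is 1' directly on integers, instead of A's breadth-first extension of tuples of pairs driven by the lock/key lookup tables followed by zip-transposition and binary-string join/parse; the transfer DP uses dict.get with defaults instead of A's conditional default-key insertions, and the result is sum(paths.values()).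
import Mathlib
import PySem

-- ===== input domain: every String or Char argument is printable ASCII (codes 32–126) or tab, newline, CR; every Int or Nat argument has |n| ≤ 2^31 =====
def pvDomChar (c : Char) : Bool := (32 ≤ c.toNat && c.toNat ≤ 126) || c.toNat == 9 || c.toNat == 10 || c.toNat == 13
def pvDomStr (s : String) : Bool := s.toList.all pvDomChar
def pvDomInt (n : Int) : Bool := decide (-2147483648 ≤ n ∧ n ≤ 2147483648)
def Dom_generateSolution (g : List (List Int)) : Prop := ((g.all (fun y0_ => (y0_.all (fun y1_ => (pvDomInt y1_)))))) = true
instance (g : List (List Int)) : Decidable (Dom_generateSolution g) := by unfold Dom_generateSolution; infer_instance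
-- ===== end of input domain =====

-- B rebuilds the preimage column pairs by a bit-accumulating DFS with the arithmetic
-- "exactly one of four" rule instead of A's lock/key-table tuple extension + zip +
-- binary-string parsing; same return value on every input A accepts.

-- ===== PORT A =====

-- the 'lock' dict; keys used by the program are always pairs of 0/1 pairs, so the
-- catch-all (Python: KeyError) is never reached
def lockA : (Int × Int) → (Int × Int) → Int
  | (0, 0), (0, 0) => 0 | (0, 0), (0, 1) => 1 | (0, 0), (1, 0) => 1 | (0, 0), (1, 1) => 0
  | (0, 1), (0, 0) => 1 | (0, 1), (0, 1) => 0 | (0, 1), (1, 0) => 0 | (0, 1), (1, 1) => 0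
  | (1, 0), (0, 0) => 1 | (1, 0), (0, 1) => 0 | (1, 0), (1, 0) => 0 | (1, 0), (1, 1) => 0
  | (1, 1), (0, 0) => 0 | (1, 1), (0, 1) => 0 | (1, 1), (1, 0) => 0 | (1, 1), (1, 1) => 0
  | _, _ => 0

def key0A : List (List (Int × Int)) :=
  [[(0,0),(0,0)], [(0,0),(1,1)], [(0,1),(0,1)], [(0,1),(1,0)], [(0,1),(1,1)], [(1,0),(0,1)],
   [(1,0),(1,0)], [(1,0),(1,1)], [(1,1),(0,0)], [(1,1),(0,1)], [(1,1),(1,0)], [(1,1),(1,1)]]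

def key1A : List (List (Int × Int)) :=
  [[(0,0),(0,1)], [(0,0),(1,0)], [(0,1),(0,0)], [(1,0),(0,0)]]

def pairCombinationsA : List (Int × Int) := [(1,1),(1,0),(0,1),(0,0)]

-- hand port of int(''.join(str(e) for e in bits), 2): exact because every digit is 0 or 1
def binJoinA (bits : List Int) : Int := bits.foldl (fun acc e => acc * 2 + e) 0

def generateColumnA (column : List Int) : List (Int × Int) :=
  -- key[column[0]]: raises KeyError unless column[0] ∈ {0,1} and IndexError on [];
  -- both are excluded by Pre_ (for every column of g)
  let currentColumn0 :=
    if PySem.List.pyGetD column 0 0 = 0 then key0A else key1A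
  let currentColumn := (PySem.List.pyRange 1 (PySem.List.len column) 1).foldl
    (fun currentColumn currentRow =>
      currentColumn.foldl (fun potentialColumns permutation =>
        pairCombinationsA.foldl (fun potentialColumns combination =>
          if lockA (PySem.List.pyGetD permutation currentRow ((0:Int),(0:Int))) combination
               = PySem.List.pyGetD column currentRow 0
          then potentialColumns ++ [permutation ++ [combination]]
          else potentialColumns) potentialColumns) [])
    currentColumn0
  let matchColumns := currentColumn.map (fun i => (i.map (fun e => e.1), i.map (fun e => e.2)))
  matchColumns.foldl (fun generatedColumns pair =>
    generatedColumns ++ [(binJoinA pair.1, binJoinA pair.2)]) []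

def generateSolution (g : List (List Int)) : Int :=
  let paths : PySem.Dict Int Int :=
    (generateColumnA (PySem.List.pyGetD g 0 [])).foldl
      (fun paths pairs => paths.insert pairs.1 1) PySem.Dict.empty
  let paths := g.foldl (fun paths columns =>
    ((generateColumnA columns).foldl
      (fun (st : PySem.Dict Int Int × PySem.Dict Int Int) pair =>
        let paths := if st.1.contains pair.1 then st.1 else st.1.insert pair.1 0
        let evolution := if st.2.contains pair.2 then st.2 else st.2.insert pair.2 0
        (paths, evolution.insert pair.2 (evolution.getD pair.2 0 + paths.getD pair.1 0)))
      (paths, PySem.Dict.empty)).2) paths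
  paths.keys.foldl (fun count value => count + paths.getD value 0) 0

-- ===== PORT B =====

def ruleB (pl pr a b : Int) : Int := if pl + pr + a + b = 1 then 1 else 0

-- DFS over the remaining cells; the Python loop over the four literal pairs
-- (1,1),(1,0),(0,1),(0,0) is unrolled
def goB : List Int → Int → Int → Int → Int → List (Int × Int)
  | [], _, _, l, r => [(l, r)]
  | c :: rest, pl, pr, l, r =>
      (if ruleB pl pr 1 1 = c then goB rest 1 1 (l*2+1) (r*2+1) else []) ++
      (if ruleB pl pr 1 0 = c then goB rest 1 0 (l*2+1) (r*2) else []) ++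
      (if ruleB pl pr 0 1 = c then goB rest 0 1 (l*2) (r*2+1) else []) ++
      (if ruleB pl pr 0 0 = c then goB rest 0 0 (l*2) (r*2) else [])

-- the four nested loops over (l0,r0,l1,r1) in {0,1}^4 building starts via
-- setdefault(...).append(...): modify with default []
def startsB : PySem.Dict Int (List (Int × Int × Int × Int)) :=
  ([0, 1] : List Int).foldl (fun d l0 =>
    ([0, 1] : List Int).foldl (fun d r0 =>
      ([0, 1] : List Int).foldl (fun d l1 =>
        ([0, 1] : List Int).foldl (fun d r1 =>
          d.modify (ruleB l0 r0 l1 r1) [] (· ++ [(l1, r1, l0 * 2 + l1, r0 * 2 + r1)]))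
          d) d) d) PySem.Dict.empty

-- starts[column[0]] raises KeyError unless column[0] ∈ {0,1}, and column[0] raises
-- IndexError on []; both excluded by Pre_ (the defaults are never used inside Pre_)
def columnPairsB (column : List Int) : List (Int × Int) :=
  match column with
  | [] => []
  | c0 :: rest =>
      (startsB.getD c0 []).foldl
        (fun out q => out ++ goB rest q.1 q.2.1 q.2.2.1 q.2.2.2) []

def generateSolution_alt (g : List (List Int)) : Int :=
  let paths : PySem.Dict Int Int :=
    (columnPairsB (PySem.List.pyGetD g 0 [])).foldl
      (fun paths p => paths.insert p.1 1) PySem.Dict.empty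
  let paths := g.foldl (fun paths column =>
    (columnPairsB column).foldl
      (fun evolution p => evolution.insert p.2 (evolution.getD p.2 0 + paths.getD p.1 0))
      PySem.Dict.empty) paths
  paths.values.sum

-- ===== PRECONDITION & SPEC =====

-- exactly the inputs where Python A returns: g nonempty, every column nonempty with
-- first entry 0 or 1 (otherwise g[0]/column[0] raises IndexError or key[...] KeyError)
def Pre_generateSolution (g : List (List Int)) : Prop :=
  g ≠ [] ∧ ∀ col ∈ g, col ≠ [] ∧ (col.headI = 0 ∨ col.headI = 1)
instance (g : List (List Int)) : Decidable (Pre_generateSolution g) := by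
  unfold Pre_generateSolution; infer_instance

def pvWitness_generateSolution : List (List Int) := [[1, 0], [0, 1], [0, 0]]

def Spec_generateSolution (g : List (List Int)) (out : Int) : Prop := out = generateSolution_alt g
instance (g : List (List Int)) (out : Int) : Decidable (Spec_generateSolution g out) := by unfold Spec_generateSolution; infer_instance

-- ===== CLAIM (what is proved, stated in full; the proofs are below) =====
def Claim_equal_generateSolution : Prop := ∀ (g : List (List Int)), Dom_generateSolution g → Pre_generateSolution g → Spec_generateSolution g (generateSolution g)

-- ===== LEMMAS AND PROOFS =====

-- proof-side view of A's inner extension step at absolute row index j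
def extA (c : Int) (j : Nat) (P : List (List (Int × Int))) : List (List (Int × Int)) :=
  P.foldl (fun acc perm =>
    pairCombinationsA.foldl (fun acc comb =>
      if lockA (PySem.List.pyGetD perm (j:Int) ((0:Int),(0:Int))) comb = c
      then acc ++ [perm ++ [comb]] else acc) acc) []

def extOneF (c : Int) (p : List (Int × Int)) : List (List (Int × Int)) :=
  (pairCombinationsA.filter (fun comb => decide (lockA (p.getLastD (0,0)) comb = c))).map
    (fun comb => p ++ [comb])

def convP (p : List (Int × Int)) : Int × Int :=
  (binJoinA (p.map (fun e => e.1)), binJoinA (p.map (fun e => e.2)))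

-- invariant: every permutation has length j+2 and ends in a 0/1 pair
def GoodP (j : Nat) (P : List (List (Int × Int))) : Prop :=
  ∀ p ∈ P, p.length = j + 2 ∧ ((p.getLastD (0, 0)).1 = 0 ∨ (p.getLastD (0, 0)).1 = 1)
    ∧ ((p.getLastD (0, 0)).2 = 0 ∨ (p.getLastD (0, 0)).2 = 1)

theorem pyGetD_concat_length (q : List (Int × Int)) (x : Int × Int) (d : Int × Int) :
    PySem.List.pyGetD (q ++ [x]) ((q.length : Int)) d = x := by
  simp [PySem.List.pyGetD_natCast, List.getD_eq_getElem?_getD]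

theorem goodP_elim {j : Nat} {P : List (List (Int × Int))} (h : GoodP j P)
    {p : List (Int × Int)} (hp : p ∈ P) :
    ∃ q a b, p = q ++ [(a, b)] ∧ q.length = j + 1 ∧ (a = 0 ∨ a = 1) ∧ (b = 0 ∨ b = 1) := by
  obtain ⟨hlen, ha, hb⟩ := h p hp
  have hne : p ≠ [] := by intro hh; simp [hh] at hlen
  refine ⟨p.dropLast, (p.getLastD (0, 0)).1, (p.getLastD (0, 0)).2, ?_, ?_, ha, hb⟩
  · rw [List.getLastD_eq_getLast? , List.getLast?_eq_some_getLast hne]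
    simp [List.dropLast_append_getLast hne]
  · simp [List.length_dropLast, hlen]

theorem extA_eq_flatMap (c : Int) (j : Nat) (P : List (List (Int × Int))) (h : GoodP j P) :
    extA c (j + 1) P = P.flatMap (extOneF c) := by
  unfold extA
  rw [PySem.List.foldl_congr_mem (g := fun acc perm => acc ++ extOneF c perm)]
  · rw [PySem.List.foldl_append_eq_flatMap]; simp
  · intro acc perm hperm
    obtain ⟨q, a, b, hp, hq, ha, hb⟩ := goodP_elim h hperm
    subst hp
    have h1 : ((j + 1 : Nat) : Int) = ((q.length : Nat) : Int) := by exact_mod_cast hq.symm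
    rw [h1, pyGetD_concat_length]
    rw [PySem.List.foldl_append_ite (p := fun comb => lockA (a, b) comb = c)
        (f := fun comb => (q ++ [(a, b)]) ++ [comb])]
    simp [extOneF]

theorem binJoin_concat (xs : List Int) (y : Int) :
    binJoinA (xs ++ [y]) = binJoinA xs * 2 + y := by
  simp [binJoinA, List.foldl_append]

theorem binJoin_concat2 (xs : List Int) (u v : Int) :
    binJoinA (xs ++ [u, v]) = (binJoinA xs * 2 + u) * 2 + v := by
  simp [binJoinA, List.foldl_append]

theorem goodP_ext (c : Int) (j : Nat) (P : List (List (Int × Int))) (h : GoodP j P) :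
    GoodP (j + 1) (P.flatMap (extOneF c)) := by
  intro p hp
  simp only [List.mem_flatMap] at hp
  obtain ⟨q, hq, hpq⟩ := hp
  obtain ⟨hlen, _, _⟩ := h q hq
  simp only [extOneF, List.mem_map, List.mem_filter, pairCombinationsA] at hpq
  obtain ⟨comb, ⟨hcm, _⟩, rfl⟩ := hpq
  have hl : ((q ++ [comb]).getLastD (0, 0)) = comb := List.getLastD_concat ..
  refine ⟨by simp [hlen], ?_, ?_⟩ <;> rw [hl] <;> fin_cases hcm <;> simp

set_option maxHeartbeats 2000000 in
theorem extOne_goB (c : Int) (cs : List Int) (p : List (Int × Int)) (q : List (Int × Int))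
    (a b : Int) (hp : p = q ++ [(a, b)]) (ha : a = 0 ∨ a = 1) (hb : b = 0 ∨ b = 1) :
    (extOneF c p).flatMap (fun p' => goB cs (p'.getLastD (0,0)).1 (p'.getLastD (0,0)).2
        (binJoinA (p'.map (fun e => e.1))) (binJoinA (p'.map (fun e => e.2))))
      = goB (c :: cs) a b (binJoinA (p.map (fun e => e.1))) (binJoinA (p.map (fun e => e.2))) := by
  subst hp
  rcases ha with rfl | rfl <;> rcases hb with rfl | rfl <;>
    by_cases h0 : c = 0 <;> by_cases h1 : c = 1 <;>
    simp [extOneF, pairCombinationsA, lockA, goB, ruleB, h0, h1, eq_comm, List.filter,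
      List.map_append, binJoin_concat, binJoin_concat2, mul_comm]

set_option maxRecDepth 8192 in
theorem mainExpand : ∀ (cells : List Int) (j : Nat) (P : List (List (Int × Int))), GoodP j P →
    ((List.range cells.length).foldl (fun P k => extA (cells.getD k 0) (j + 1 + k) P) P).map convP
      = P.flatMap (fun p => goB cells (p.getLastD (0,0)).1 (p.getLastD (0,0)).2
          (binJoinA (p.map (fun e => e.1))) (binJoinA (p.map (fun e => e.2)))) := by
  intro cells
  induction cells with
  | nil =>
    intro j P h
    show List.map convP P = P.flatMap (fun p => [convP p])
    exact List.map_eq_flatMap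
  | cons c cs ih =>
    intro j P h
    have harr : ∀ k : Nat, j + 1 + (k + 1) = (j + 1) + 1 + k := by omega
    rw [List.length_cons, List.range_succ_eq_map, List.foldl_cons, List.foldl_map]
    have heq := PySem.List.foldl_congr_mem (List.range cs.length)
        (fun (x : List (List (Int × Int))) (y : Nat) => extA ((c :: cs).getD y.succ 0) (j + 1 + y.succ) x)
        (fun P k => extA (cs.getD k 0) ((j + 1) + 1 + k) P)
        (extA ((c :: cs).getD 0 0) (j + 1 + 0) P)
        (fun acc k _ => by simp only [Nat.succ_eq_add_one, List.getD_cons_succ, harr k])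
    rw [heq]
    rw [show (c :: cs).getD 0 0 = c from rfl, show j + 1 + 0 = j + 1 from rfl]
    rw [extA_eq_flatMap c j P h]
    rw [ih (j + 1) _ (goodP_ext c j P h)]
    rw [List.flatMap_assoc]
    refine List.flatMap_congr ?_
    intro p hp
    obtain ⟨q, a, b, hpq, hlen, ha, hb⟩ := goodP_elim h hp
    have hl : (p.getLastD (0, 0)) = (a, b) := by rw [hpq]; exact List.getLastD_concat ..
    rw [hl]
    exact extOne_goB c cs p q a b hpq ha hb

theorem startsB_zero : startsB.getD 0 [] =
    [(0,0,0,0),(1,1,1,1),(0,1,0,3),(1,0,1,2),(1,1,1,3),(0,1,2,1),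
     (1,0,3,0),(1,1,3,1),(0,0,2,2),(0,1,2,3),(1,0,3,2),(1,1,3,3)] := by decide

theorem startsB_one : startsB.getD 1 [] = [(0,1,0,1),(1,0,1,0),(0,0,0,2),(0,0,2,0)] := by decide

set_option maxRecDepth 8192 in
theorem genCol_eq (c0 : Int) (rest : List Int) (h : c0 = 0 ∨ c0 = 1) :
    generateColumnA (c0 :: rest) = columnPairsB (c0 :: rest) := by
  unfold generateColumnA
  have hlen : PySem.List.len (c0 :: rest) = ((rest.length : Int) + 1) := by
    simp [PySem.List.len_eq]
  rw [hlen, PySem.List.pyGetD_zero_cons]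
  rw [PySem.List.pyRange_one]
  have h2 : ((rest.length : Int) + 1 - 1).toNat = rest.length := by omega
  rw [h2]
  simp only [List.foldl_map]
  have hcast : ∀ k : Nat, (1 : Int) + (k : Int) = ((k + 1 : Nat) : Int) := by
    intro k; push_cast; ring
  have hbody := PySem.List.foldl_congr_mem (List.range rest.length)
      (fun (cc : List (List (Int × Int))) (k : Nat) =>
        cc.foldl (fun potentialColumns permutation =>
          pairCombinationsA.foldl (fun potentialColumns combination =>
            if lockA (PySem.List.pyGetD permutation (1 + (k : Int)) ((0:Int),(0:Int))) combination
                 = PySem.List.pyGetD (c0 :: rest) (1 + (k : Int)) 0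
            then potentialColumns ++ [permutation ++ [combination]]
            else potentialColumns) potentialColumns) [])
      (fun P k => extA (rest.getD k 0) (0 + 1 + k) P)
      (if c0 = 0 then key0A else key1A)
      (fun acc k _ => by
        unfold extA
        simp only [hcast k, PySem.List.pyGetD_natCast, List.getD_cons_succ,
          show (0 + 1 + k : Nat) = k + 1 from by omega])
  rw [hbody]
  rw [PySem.List.foldl_append_singleton_eq_map]
  rw [List.nil_append]
  show List.map convP (List.foldl (fun P k => extA (rest.getD k 0) (0 + 1 + k) P)
      (if c0 = 0 then key0A else key1A) (List.range rest.length)) = columnPairsB (c0 :: rest)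
  rcases h with rfl | rfl
  · rw [if_pos rfl]
    rw [mainExpand rest 0 key0A (by unfold GoodP; decide)]
    simp [key0A, columnPairsB, startsB_zero, binJoinA]
  · rw [if_neg (by norm_num)]
    rw [mainExpand rest 0 key1A (by unfold GoodP; decide)]
    simp [key1A, columnPairsB, startsB_one, binJoinA]

theorem dpStep (pairs : List (Int × Int)) : ∀ (pA pB evo : PySem.Dict Int Int),
    (∀ k, pA.getD k 0 = pB.getD k 0) →
    (pairs.foldl
      (fun (st : PySem.Dict Int Int × PySem.Dict Int Int) pair =>
        let paths := if st.1.contains pair.1 then st.1 else st.1.insert pair.1 0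
        let evolution := if st.2.contains pair.2 then st.2 else st.2.insert pair.2 0
        (paths, evolution.insert pair.2 (evolution.getD pair.2 0 + paths.getD pair.1 0)))
      (pA, evo)).2
      = pairs.foldl (fun e p => e.insert p.2 (e.getD p.2 0 + pB.getD p.1 0)) evo := by
  induction pairs with
  | nil => intro pA pB evo h; rfl
  | cons pr ps ih =>
    intro pA pB evo h
    simp only [List.foldl_cons]
    have hA1 : (if pA.contains pr.1 then pA else pA.insert pr.1 0).getD pr.1 0 = pB.getD pr.1 0 := by
      by_cases hc : pA.contains pr.1
      · simp only [hc, if_true]; exact h pr.1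
      · simp only [hc, if_false, Bool.false_eq_true]
        rw [PySem.Dict.getD_insert_self, ← h pr.1]
        exact (PySem.Dict.getD_of_not_contains pA 0 (by simpa using hc)).symm
    have hE : (if evo.contains pr.2 then evo else evo.insert pr.2 0).insert pr.2
          ((if evo.contains pr.2 then evo else evo.insert pr.2 0).getD pr.2 0
            + (if pA.contains pr.1 then pA else pA.insert pr.1 0).getD pr.1 0)
        = evo.insert pr.2 (evo.getD pr.2 0 + pB.getD pr.1 0) := by
      rw [hA1]
      by_cases he : evo.contains pr.2
      · simp only [he, if_true]
      · simp only [he, if_false, Bool.false_eq_true]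
        rw [PySem.Dict.getD_insert_self, PySem.Dict.insert_insert_self,
          PySem.Dict.getD_of_not_contains evo 0 (by simpa using he)]
    have hnew : ∀ k, (if pA.contains pr.1 then pA else pA.insert pr.1 0).getD k 0 = pB.getD k 0 := by
      intro k
      by_cases hc : pA.contains pr.1
      · simp only [hc, if_true]; exact h k
      · simp only [hc, if_false, Bool.false_eq_true]
        rw [PySem.Dict.getD_insert pA pr.1 k 0 0]
        split_ifs with hk
        · rw [hk, ← h pr.1]
          exact (PySem.Dict.getD_of_not_contains pA 0 (by simpa using hc)).symm
        · exact h k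
    rw [ih _ pB _ hnew, hE]

theorem sumKeys (d : PySem.Dict Int Int) (h : d.keys.Nodup) :
    d.keys.foldl (fun c k => c + d.getD k 0) 0 = d.values.sum := by
  rw [PySem.List.foldl_add (g := fun k => d.getD k 0)]
  rw [PySem.Dict.values_eq_map_keys d h 0]
  simp

-- ===== VERDICT (by name: the statement is the Claim_ definition above) =====
theorem generateSolution_spec : Claim_equal_generateSolution := by
  intro g _hdom hpre
  unfold Spec_generateSolution generateSolution generateSolution_alt
  obtain ⟨hne, hcols⟩ := hpre
  have hcol : ∀ col ∈ g, generateColumnA col = columnPairsB col := by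
    intro col hc
    obtain ⟨hcne, hh⟩ := hcols col hc
    obtain ⟨c0, rest, rfl⟩ : ∃ c0 rest, col = c0 :: rest := by
      cases col with
      | nil => exact absurd rfl hcne
      | cons a l => exact ⟨a, l, rfl⟩
    exact genCol_eq c0 rest (by simpa using hh)
  have hg0m : PySem.List.pyGetD g 0 [] ∈ g := by
    cases g with
    | nil => exact absurd rfl hne
    | cons c gs => rw [PySem.List.pyGetD_zero_cons]; exact List.mem_cons_self
  have hg0 : generateColumnA (PySem.List.pyGetD g 0 []) = columnPairsB (PySem.List.pyGetD g 0 []) :=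
    hcol _ hg0m
  rw [hg0]
  have hinit : (columnPairsB (PySem.List.pyGetD g 0 [])).foldl
      (fun (paths : PySem.Dict Int Int) pairs => paths.insert pairs.1 1) PySem.Dict.empty
      = (columnPairsB (PySem.List.pyGetD g 0 [])).foldl
      (fun (paths : PySem.Dict Int Int) p => paths.insert p.1 1) PySem.Dict.empty := rfl
  rw [hinit]
  set p0 : PySem.Dict Int Int := (columnPairsB (PySem.List.pyGetD g 0 [])).foldl
      (fun (paths : PySem.Dict Int Int) p => paths.insert p.1 1) PySem.Dict.empty with hp0
  have hfold := PySem.List.foldl_congr_mem g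
      (fun (paths : PySem.Dict Int Int) columns =>
        ((generateColumnA columns).foldl
          (fun (st : PySem.Dict Int Int × PySem.Dict Int Int) pair =>
            let paths := if st.1.contains pair.1 then st.1 else st.1.insert pair.1 0
            let evolution := if st.2.contains pair.2 then st.2 else st.2.insert pair.2 0
            (paths, evolution.insert pair.2 (evolution.getD pair.2 0 + paths.getD pair.1 0)))
          (paths, PySem.Dict.empty)).2)
      (fun (paths : PySem.Dict Int Int) column =>
        (columnPairsB column).foldl
          (fun evolution p => evolution.insert p.2 (evolution.getD p.2 0 + paths.getD p.1 0))
          PySem.Dict.empty)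
      p0
      (fun acc col hc => by
        simp only [hcol col hc]
        exact dpStep (columnPairsB col) acc acc PySem.Dict.empty (fun k => rfl))
  show (List.foldl
      (fun (paths : PySem.Dict Int Int) columns =>
        ((generateColumnA columns).foldl
          (fun (st : PySem.Dict Int Int × PySem.Dict Int Int) pair =>
            let paths := if st.1.contains pair.1 then st.1 else st.1.insert pair.1 0
            let evolution := if st.2.contains pair.2 then st.2 else st.2.insert pair.2 0
            (paths, evolution.insert pair.2 (evolution.getD pair.2 0 + paths.getD pair.1 0)))
          (paths, PySem.Dict.empty)).2) p0 g).keys.foldl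
      (fun count value => count + (List.foldl
      (fun (paths : PySem.Dict Int Int) columns =>
        ((generateColumnA columns).foldl
          (fun (st : PySem.Dict Int Int × PySem.Dict Int Int) pair =>
            let paths := if st.1.contains pair.1 then st.1 else st.1.insert pair.1 0
            let evolution := if st.2.contains pair.2 then st.2 else st.2.insert pair.2 0
            (paths, evolution.insert pair.2 (evolution.getD pair.2 0 + paths.getD pair.1 0)))
          (paths, PySem.Dict.empty)).2) p0 g).getD value 0) 0
    = (List.foldl
      (fun (paths : PySem.Dict Int Int) column =>
        (columnPairsB column).foldl
          (fun evolution p => evolution.insert p.2 (evolution.getD p.2 0 + paths.getD p.1 0))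
          PySem.Dict.empty) p0 g).values.sum
  rw [hfold]
  have hnd : ∀ (l : List (List Int)) (d : PySem.Dict Int Int), d.keys.Nodup →
      ((l.foldl (fun (paths : PySem.Dict Int Int) column =>
        (columnPairsB column).foldl
          (fun evolution p => evolution.insert p.2 (evolution.getD p.2 0 + paths.getD p.1 0))
          PySem.Dict.empty) d) : PySem.Dict Int Int).keys.Nodup := by
    intro l
    induction l with
    | nil => intro d h; exact h
    | cons c cs ih =>
      intro d h
      exact ih _ (PySem.Dict.nodup_keys_foldl_insert_key (columnPairsB c)
        (fun (p : Int × Int) => p.2)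
        (fun evolution p => evolution.getD p.2 0 + d.getD p.1 0)
        PySem.Dict.empty PySem.Dict.nodup_keys_empty)
  have hp0nd : p0.keys.Nodup :=
    PySem.Dict.nodup_keys_foldl_insert_key (columnPairsB (PySem.List.pyGetD g 0 []))
      (fun (p : Int × Int) => p.1) (fun _ _ => 1) PySem.Dict.empty PySem.Dict.nodup_keys_empty
  exact sumKeys _ (hnd g p0 hp0nd)
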